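-- pv_equiv track=rewrite | github.com/Sominemo/TopazMineSweeper | test.py | hints
-- ===== SOURCE A (Python) =====
-- def hints(mines):
--     cache = []
--
--     for row in range(len(mines)):
--         cache.append([])
--         for col in range(len(mines[row])):
--             cache[row].append(0)
--
--             if row > 0 and mines[row - 1][col] == 1:
--                 cache[row][col] += 1
--
--             if row < len(mines) - 1 and mines[row + 1][col] == 1:
--                 cache[row][col] += 1
--
--             if col > 0 and mines[row][col - 1] == 1:
--                 cache[row][col] += 1
--
--             if col < len(mines[row]) - 1 and mines[row][col + 1] == 1:
--                 cache[row][col] += 1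
--
--             if row > 0 and col > 0 and mines[row - 1][col - 1] == 1:
--                 cache[row][col] += 1
--
--             if row > 0 and col < len(mines[row]) - 1 and mines[row - 1][col + 1] == 1:
--                 cache[row][col] += 1
--
--             if row < len(mines) - 1 and col > 0 and mines[row + 1][col - 1] == 1:
--                 cache[row][col] += 1
--
--             if row < len(mines) - 1 and col < len(mines[row]) - 1 and mines[row + 1][col + 1] == 1:
--                 cache[row][col] += 1
--
--     return cache
-- ===== SOURCE B (Python) =====
-- def hints(mines):
--     # Separable 3x3 convolution: indicator grid -> horizontal 3-sums -> vertical 3-sums minus center.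
--     b = [[1 if v == 1 else 0 for v in row] for row in mines]
--     h = [[(row[c - 1] if c > 0 else 0) + row[c] + (row[c + 1] if c + 1 < len(row) else 0)
--           for c in range(len(row))] for row in b]
--     return [[(h[r - 1][c] if r > 0 and c < len(h[r - 1]) else 0)
--              + h[r][c]
--              + (h[r + 1][c] if r + 1 < len(h) and c < len(h[r + 1]) else 0)
--              - b[r][c]
--              for c in range(len(h[r]))] for r in range(len(h))]
-- ===== Notes on version B (the rewrite author's own statement) =====
-- stated objective: alternative
-- what changed: Replaced A's per-cell gather of eight guarded neighbor reads by a separable 3x3 convolution: build the 0/1 indicator grid, take horizontal 3-sums per row, then combine three vertically adjacent 3-sums and subtract the centre indicator.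
import Mathlib
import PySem

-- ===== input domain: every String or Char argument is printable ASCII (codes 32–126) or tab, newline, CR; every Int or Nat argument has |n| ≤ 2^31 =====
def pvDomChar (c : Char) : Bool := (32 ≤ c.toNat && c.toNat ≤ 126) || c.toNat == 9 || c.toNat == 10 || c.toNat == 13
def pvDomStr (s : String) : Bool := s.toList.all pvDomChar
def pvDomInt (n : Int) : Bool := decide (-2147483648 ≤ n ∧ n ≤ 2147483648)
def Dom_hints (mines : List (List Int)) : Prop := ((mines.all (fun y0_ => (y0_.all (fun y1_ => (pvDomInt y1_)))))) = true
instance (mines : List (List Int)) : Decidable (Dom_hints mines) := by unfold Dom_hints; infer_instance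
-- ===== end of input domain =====

-- B replaces A's per-cell 8-way gather by a separable 3x3 convolution (horizontal 3-sums of the
-- 0/1 indicator grid, then vertical 3-sums minus the centre); objective: alternative algorithm.

-- ===== PORT A =====
-- mines[i][j]; inside Pre_hints every such access is in range (A raises IndexError exactly outside Pre_hints)
def pyAt (mines : List (List Int)) (i j : Int) : Int :=
  PySem.List.pyGetD (PySem.List.pyGetD mines i []) j 0

-- the body of A's inner loop: cache[row].append(0) followed by the eight guarded increments, in order
def aCell (mines : List (List Int)) (row col : Int) : Int :=
  let n : Int := PySem.List.len mines
  let m : Int := PySem.List.len (PySem.List.pyGetD mines row [])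
  let v : Int := 0
  let v := if 0 < row ∧ pyAt mines (row - 1) col = 1 then v + 1 else v
  let v := if row < n - 1 ∧ pyAt mines (row + 1) col = 1 then v + 1 else v
  let v := if 0 < col ∧ pyAt mines row (col - 1) = 1 then v + 1 else v
  let v := if col < m - 1 ∧ pyAt mines row (col + 1) = 1 then v + 1 else v
  let v := if 0 < row ∧ 0 < col ∧ pyAt mines (row - 1) (col - 1) = 1 then v + 1 else v
  let v := if 0 < row ∧ col < m - 1 ∧ pyAt mines (row - 1) (col + 1) = 1 then v + 1 else v
  let v := if row < n - 1 ∧ 0 < col ∧ pyAt mines (row + 1) (col - 1) = 1 then v + 1 else v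
  let v := if row < n - 1 ∧ col < m - 1 ∧ pyAt mines (row + 1) (col + 1) = 1 then v + 1 else v
  v

def hints (mines : List (List Int)) : List (List Int) :=
  (PySem.List.pyRange 0 (PySem.List.len mines) 1).foldl
    (fun cache row =>
      cache ++ [(PySem.List.pyRange 0 (PySem.List.len (PySem.List.pyGetD mines row [])) 1).foldl
        (fun racc col => racc ++ [aCell mines row col]) []])
    []

-- ===== PORT B =====
-- [1 if v == 1 else 0 for v in row]
def indRow (row : List Int) : List Int := row.map (fun v => if v = 1 then (1 : Int) else 0)

-- horizontal 3-sum of one indicator row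
def hRow (row : List Int) : List Int :=
  (List.range row.length).map (fun c =>
    (if 0 < c then row.getD (c - 1) 0 else 0) + row.getD c 0
      + (if c + 1 < row.length then row.getD (c + 1) 0 else 0))

def hints_alt (mines : List (List Int)) : List (List Int) :=
  let b := mines.map indRow
  let h := b.map hRow
  (List.range h.length).map (fun r =>
    (List.range (h.getD r []).length).map (fun c =>
      (if 0 < r ∧ c < (h.getD (r - 1) []).length then (h.getD (r - 1) []).getD c 0 else 0)
        + (h.getD r []).getD c 0
        + (if r + 1 < h.length ∧ c < (h.getD (r + 1) []).length then (h.getD (r + 1) []).getD c 0 else 0)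
        - (b.getD r []).getD c 0))

-- ===== PRECONDITION & SPEC =====
-- Pre_hints: the grid is rectangular (all rows of equal length). A raises IndexError on every
-- non-rectangular grid (it bounds columns by the current row while indexing adjacent rows), so
-- Pre_hints excludes exactly the inputs on which A raises.
def Pre_hints (mines : List (List Int)) : Prop :=
  ∀ row ∈ mines, row.length = (mines.headD []).length
instance (mines : List (List Int)) : Decidable (Pre_hints mines) := by unfold Pre_hints; infer_instance

def pvWitness_hints : List (List Int) := [[1, 0], [0, 1]]

def Spec_hints (mines : List (List Int)) (out : List (List Int)) : Prop := out = hints_alt mines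
instance (mines : List (List Int)) (out : List (List Int)) : Decidable (Spec_hints mines out) := by unfold Spec_hints; infer_instance

-- ===== CLAIM (what is proved, stated in full; the proofs are below) =====
def Claim_equal_hints : Prop := ∀ (mines : List (List Int)), Dom_hints mines → Pre_hints mines → Spec_hints mines (hints mines)

-- ===== LEMMAS AND PROOFS =====

-- indicator of a mine at (r, c), Nat indices (proof-side abbreviation)
def ind (mines : List (List Int)) (r c : Nat) : Int :=
  if (mines.getD r []).getD c 0 = 1 then 1 else 0

-- B's cell value in canonical form
def bCell (mines : List (List Int)) (n m r c : Nat) : Int :=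
  (if 0 < r ∧ c < m then (hRow (indRow (mines.getD (r - 1) []))).getD c 0 else 0)
    + (hRow (indRow (mines.getD r []))).getD c 0
    + (if r + 1 < n ∧ c < m then (hRow (indRow (mines.getD (r + 1) []))).getD c 0 else 0)
    - (indRow (mines.getD r [])).getD c 0

lemma ite_inc (p : Prop) [Decidable p] (v : Int) :
    (if p then v + 1 else v) = v + (if p then 1 else 0) := by
  split <;> ring

lemma getD_indRow (row : List Int) (c : Nat) (h : c < row.length) :
    (indRow row).getD c 0 = if row.getD c 0 = 1 then (1 : Int) else 0 := by
  rw [List.getD_eq_getElem _ _ (by simpa [indRow] using h),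
      List.getD_eq_getElem _ _ h]
  simp [indRow]

lemma length_indRow (row : List Int) : (indRow row).length = row.length := by
  simp [indRow]

lemma length_hRow (row : List Int) : (hRow row).length = row.length := by
  simp [hRow]

lemma getD_hRow (row : List Int) (c : Nat) (h : c < row.length) :
    (hRow row).getD c 0 =
      (if 0 < c then row.getD (c - 1) 0 else 0) + row.getD c 0
        + (if c + 1 < row.length then row.getD (c + 1) 0 else 0) := by
  rw [List.getD_eq_getElem _ _ (by simpa [length_hRow] using h)]
  simp [hRow]

lemma hA (mines : List (List Int)) (n m : Nat) (hn : n = mines.length)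
    (hlen : ∀ r, r < n → (mines.getD r []).length = m) :
    hints mines = (List.range n).map (fun (r : Nat) => (List.range m).map (fun (c : Nat) => aCell mines (r : Int) (c : Int))) := by
  subst hn
  unfold hints
  simp only [PySem.List.len_eq, PySem.List.pyRange_zero_nat, PySem.List.foldl_append_singleton_eq_map,
    List.nil_append, List.map_map]
  refine List.map_congr_left (fun r hrr => ?_)
  simp only [Function.comp_apply, PySem.List.pyGetD_natCast]
  rw [hlen r (List.mem_range.mp hrr)]
  rfl

lemma hB (mines : List (List Int)) (n m : Nat) (hn : n = mines.length)
    (hlen : ∀ r, r < n → (mines.getD r []).length = m) :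
    hints_alt mines = (List.range n).map (fun r => (List.range m).map (fun c => bCell mines n m r c)) := by
  subst hn
  unfold hints_alt
  have hgb : ∀ r', r' < mines.length → (mines.map indRow).getD r' [] = indRow (mines.getD r' []) := by
    intro r' hr'
    rw [List.getD_eq_getElem _ _ (by simpa using hr'), List.getD_eq_getElem _ _ hr']
    simp
  have hgh : ∀ r', r' < mines.length →
      ((mines.map indRow).map hRow).getD r' [] = hRow (indRow (mines.getD r' [])) := by
    intro r' hr'
    rw [List.getD_eq_getElem _ _ (by simpa using hr'), List.getD_eq_getElem _ _ hr']
    simp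
  simp only [List.length_map]
  refine List.map_congr_left (fun r hrr => ?_)
  have hr := List.mem_range.mp hrr
  rw [hgh r hr, length_hRow, length_indRow, hlen r hr]
  refine List.map_congr_left (fun c hcc => ?_)
  unfold bCell
  rw [hgh (r - 1) (by omega), hgb r hr]
  simp only [length_hRow, length_indRow, hlen (r - 1) (by omega)]
  by_cases hrn : r + 1 < mines.length
  · rw [hgh (r + 1) hrn]
    simp only [length_hRow, length_indRow, hlen (r + 1) hrn]
  · simp [hrn]

lemma cell_eq (mines : List (List Int)) (n m r c : Nat) (hn : n = mines.length)
    (hlen : ∀ r', r' < n → (mines.getD r' []).length = m) (hr : r < n) (hc : c < m) :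
    aCell mines (r : Int) (c : Int) = bCell mines n m r c := by
  subst hn
  have hIndL : ∀ r', r' < mines.length → (indRow (mines.getD r' [])).length = m := by
    intro r' h'; rw [length_indRow, hlen r' h']
  have hval : ∀ r', r' < mines.length → (hRow (indRow (mines.getD r' []))).getD c 0 =
      (if 0 < c then ind mines r' (c - 1) else 0) + ind mines r' c
        + (if c + 1 < m then ind mines r' (c + 1) else 0) := by
    intro r' h'
    rw [getD_hRow _ _ (by rw [hIndL r' h']; exact hc), hIndL r' h']
    congr 1
    · congr 1
      · by_cases h0 : 0 < c
        · simp only [h0, if_true]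
          rw [getD_indRow _ _ (by rw [hlen r' h']; omega)]; rfl
        · simp [h0]
      · rw [getD_indRow _ _ (by rw [hlen r' h']; exact hc)]; rfl
    · by_cases hcm : c + 1 < m
      · simp only [hcm, if_true]
        rw [getD_indRow _ _ (by rw [hlen r' h']; omega)]; rfl
      · simp [hcm]
  have g1 : ((0:Int) < (r : Int)) ↔ 0 < r := by omega
  have g2 : ((r : Int) < (mines.length : Int) - 1) ↔ r + 1 < mines.length := by omega
  have g3 : ((0:Int) < (c : Int)) ↔ 0 < c := by omega
  have g4 : ((c : Int) < (m : Int) - 1) ↔ c + 1 < m := by omega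
  unfold aCell pyAt bCell
  simp only [PySem.List.len_eq, PySem.List.pyGetD_natCast]
  rw [hlen r hr]
  simp only [g1, g2, g3, g4]
  rw [hval r hr, getD_indRow _ _ (by rw [hlen r hr]; exact hc)]
  by_cases hr0 : 0 < r <;> by_cases hrn : r + 1 < mines.length <;>
    by_cases hc0 : 0 < c <;> by_cases hcm : c + 1 < m <;>
  · try rw [hval (r - 1) (by omega)]
    try rw [hval (r + 1) (by omega)]
    simp only [hr0, hrn, hc0, hcm, if_true, if_false, true_and, false_and, and_false, ite_inc]
    try rw [show ((r : Int) - 1) = (((r - 1 : Nat)) : Int) from by omega]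
    try rw [show ((c : Int) - 1) = (((c - 1 : Nat)) : Int) from by omega]
    try rw [show ((r : Int) + 1) = (((r + 1 : Nat)) : Int) from by omega]
    try rw [show ((c : Int) + 1) = (((c + 1 : Nat)) : Int) from by omega]
    simp only [PySem.List.pyGetD_natCast, ind, hc, if_true]
    ring

theorem main_eq (mines : List (List Int)) (h : Pre_hints mines) : hints mines = hints_alt mines := by
  set n := mines.length with hn
  set m := (mines.headD []).length with hm
  have hlen : ∀ r, r < n → (mines.getD r []).length = m := by
    intro r hr
    rw [List.getD_eq_getElem _ _ hr]
    exact h _ (List.getElem_mem hr)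
  rw [hA mines n m rfl hlen, hB mines n m rfl hlen]
  refine List.map_congr_left (fun r hrr => ?_)
  refine List.map_congr_left (fun c hcc => ?_)
  exact cell_eq mines n m r c rfl hlen (List.mem_range.mp hrr) (List.mem_range.mp hcc)

-- ===== VERDICT (by name: the statement is the Claim_ definition above) =====
theorem hints_spec : Claim_equal_hints := by
  intro mines _ hpre
  unfold Spec_hints
  exact main_eq mines hpre
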